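-- pv_equiv track=rewrite | github.com/shivam990/Semantic-Textual-Similarity | project/word_ngram.py | char_ngram
-- ===== SOURCE A (Python) =====
-- def char_ngram(n, str1, str2):
--     count=0
--     str1 = str1.replace(" ", "")
--     str2 = str2.replace(" ", "")
--     str1_char = []
--     str2_char = []
--     for i in range(len(str1)):
--         ch = str1[i:i+2]
--         str1_char.append(ch)
--     for i in range(len(str2)):
--         ch = str2[i:i+2]
--         str2_char.append(ch)
--     for i in str1_char:
--         for j in str2_char:
--             if(i==j):
--                 count = count + 1
--     return count
-- ===== SOURCE B (Python) =====
-- def char_ngram(n, str1, str2):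
--     s1 = str1.replace(" ", "")
--     s2 = str2.replace(" ", "")
--     counts = {}
--     for i in range(len(s2)):
--         g = s2[i:i+2]
--         counts[g] = counts.get(g, 0) + 1
--     total = 0
--     for i in range(len(s1)):
--         total += counts.get(s1[i:i+2], 0)
--     return total
-- ===== Notes on version B (the rewrite author's own statement) =====
-- stated objective: faster
-- what changed: Replaces the quadratic nested scan over the two bigram lists with a dictionary of bigram counts built once from str2, then a single pass over str1's bigrams summing the looked-up counts.
import Mathlib
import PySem

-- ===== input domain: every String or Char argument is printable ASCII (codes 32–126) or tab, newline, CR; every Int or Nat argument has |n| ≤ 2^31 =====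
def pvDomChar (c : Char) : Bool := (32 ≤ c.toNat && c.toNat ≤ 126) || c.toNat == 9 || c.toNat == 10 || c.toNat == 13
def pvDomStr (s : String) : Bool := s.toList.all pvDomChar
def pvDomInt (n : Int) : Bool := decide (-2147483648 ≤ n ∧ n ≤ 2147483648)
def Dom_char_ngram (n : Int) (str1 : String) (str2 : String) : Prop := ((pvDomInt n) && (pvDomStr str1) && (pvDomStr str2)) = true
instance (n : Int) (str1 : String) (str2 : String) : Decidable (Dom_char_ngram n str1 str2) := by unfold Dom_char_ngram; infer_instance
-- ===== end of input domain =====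

-- Header: B replaces A's nested quadratic scan with a bigram-count dictionary built once from str2, then one summing pass over str1 (asymptotically faster).

-- ===== PORT A =====
def char_ngram (n : Int) (str1 : String) (str2 : String) : Int :=
  let s1 := (PySem.Str.replace str1 " " "").toList
  let s2 := (PySem.Str.replace str2 " " "").toList
  let str1_char := (PySem.List.pyRange 0 (s1.length : Int) 1).map
    (fun i => PySem.List.slice s1 (some i) (some (i + 2)))
  let str2_char := (PySem.List.pyRange 0 (s2.length : Int) 1).map
    (fun i => PySem.List.slice s2 (some i) (some (i + 2)))
  str1_char.foldl (fun count i =>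
    str2_char.foldl (fun count j => if i == j then count + 1 else count) count) 0

-- ===== PORT B =====
def char_ngram_alt (n : Int) (str1 : String) (str2 : String) : Int :=
  let s1 := (PySem.Str.replace str1 " " "").toList
  let s2 := (PySem.Str.replace str2 " " "").toList
  let counts := ((PySem.List.pyRange 0 (s2.length : Int) 1).map
      (fun i => PySem.List.slice s2 (some i) (some (i + 2)))).foldl
    (fun d g => d.insert g (d.getD g 0 + 1)) PySem.Dict.empty
  ((PySem.List.pyRange 0 (s1.length : Int) 1).map
      (fun i => PySem.List.slice s1 (some i) (some (i + 2)))).foldl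
    (fun total g => total + counts.getD g 0) 0

-- ===== PRECONDITION & SPEC =====
def Spec_char_ngram (n : Int) (str1 : String) (str2 : String) (out : Int) : Prop := out = char_ngram_alt n str1 str2
instance (n : Int) (str1 : String) (str2 : String) (out : Int) : Decidable (Spec_char_ngram n str1 str2 out) := by unfold Spec_char_ngram; infer_instance

-- ===== CLAIM (what is proved, stated in full; the proofs are below) =====
def Claim_equal_char_ngram : Prop := ∀ (n : Int) (str1 : String) (str2 : String), Dom_char_ngram n str1 str2 → Spec_char_ngram n str1 str2 (char_ngram n str1 str2)

-- ===== LEMMAS AND PROOFS =====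

-- A's nested loop and B's counter-lookup loop both compute, per bigram of str1, the
-- number of its occurrences among str2's bigrams.
theorem char_ngram_folds_eq (l1 l2 : List (List Char)) (a : Int) :
    l1.foldl (fun count i =>
      l2.foldl (fun count j => if i == j then count + 1 else count) count) a
    = l1.foldl (fun total g =>
        total + (l2.foldl (fun d g => d.insert g (d.getD g 0 + 1)) PySem.Dict.empty).getD g 0) a := by
  induction l1 generalizing a with
  | nil => rfl
  | cons x xs ih =>
    rw [List.foldl_cons, List.foldl_cons]
    have hsym : ∀ j : List Char, (x == j) = (j == x) := fun j => by rw [BEq.comm]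
    simp only [hsym]
    rw [PySem.List.foldl_beq_add_one, ih]
    simp only [PySem.Dict.getD_foldl_insert_add_one, PySem.Dict.getD_empty]
    ring_nf

-- ===== VERDICT (by name: the statement is the Claim_ definition above) =====
theorem char_ngram_spec : Claim_equal_char_ngram := by
  intro n str1 str2 _
  unfold Spec_char_ngram char_ngram char_ngram_alt
  exact char_ngram_folds_eq _ _ 0
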